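-- pv_equiv track=rewrite | github.com/jsuci/gidapp | backup/stl/unused_scripts/pair_digits_v2.1.py | get_common_digit
-- ===== SOURCE A (Python) =====
-- def get_common_digit(results):
--     for i in range(10):
--         has_common_digit = True
--         common_digit = str(i)
--         for result in results:
--             if not common_digit in result:
--                 has_common_digit = False
--
--         if has_common_digit:
--             return common_digit
-- ===== SOURCE B (Python) =====
-- def get_common_digit(results):
--     common = set("0123456789")
--     for result in results:
--         common &= set(result)
--     return min(common) if common else None
-- ===== Notes on version B (the rewrite author's own statement) =====
-- stated objective: simpler
-- what changed: Replaces the 10x|results| nested membership scan by a single fold intersecting a digit set with each result's character set, then takes the minimum of the surviving digits.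
import Mathlib
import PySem

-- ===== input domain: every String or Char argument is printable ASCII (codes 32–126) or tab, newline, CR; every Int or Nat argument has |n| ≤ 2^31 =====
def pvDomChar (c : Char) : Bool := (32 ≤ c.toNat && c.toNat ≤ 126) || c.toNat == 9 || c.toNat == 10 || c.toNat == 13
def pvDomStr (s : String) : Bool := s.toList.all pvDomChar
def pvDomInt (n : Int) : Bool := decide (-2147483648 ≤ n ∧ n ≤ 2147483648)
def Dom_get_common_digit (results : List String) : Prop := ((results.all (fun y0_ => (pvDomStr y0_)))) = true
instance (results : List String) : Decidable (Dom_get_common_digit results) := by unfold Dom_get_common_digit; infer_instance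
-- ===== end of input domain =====

-- B replaces A's 10×n nested membership scan by one fold of set intersections plus min; objective: simpler.

-- ===== PORT A =====
-- the outer `for i in range(10)` with early return, as structural recursion over the range list
def getCommonDigitLoop (results : List String) : List Int → Option String
  | [] => none
  | i :: rest =>
    let common_digit := PySem.Int.toStr i
    let has_common_digit :=
      results.foldl (fun h result => if !(PySem.Str.isIn common_digit result) then false else h) true
    if has_common_digit then some common_digit else getCommonDigitLoop results rest

def get_common_digit (results : List String) : Option String :=
  getCommonDigitLoop results (PySem.List.pyRange 0 10 1)

-- ===== PORT B =====
def get_common_digit_alt (results : List String) : Option String :=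
  let common : PySem.Set Char :=
    results.foldl (fun c result => PySem.Set.inter c (PySem.Set.ofList result.toList))
      (PySem.Set.ofList "0123456789".toList)
  if common ≠ [] then
    match PySem.List.min? common (fun x => x) with
    | some m => some (String.ofList [m])
    | none => none
  else none

-- ===== PRECONDITION & SPEC =====
def Spec_get_common_digit (results : List String) (out : Option String) : Prop := out = get_common_digit_alt results
instance (results : List String) (out : Option String) : Decidable (Spec_get_common_digit results out) := by unfold Spec_get_common_digit; infer_instance

-- ===== CLAIM (what is proved, stated in full; the proofs are below) =====
def Claim_equal_get_common_digit : Prop := ∀ (results : List String), Dom_get_common_digit results → Spec_get_common_digit results (get_common_digit results)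

-- ===== LEMMAS AND PROOFS =====

-- the inner Python loop computes `all`
theorem foldl_if_all (p : String → Bool) (l : List String) (b : Bool) :
    l.foldl (fun h r => if !(p r) then false else h) b = (b && l.all p) := by
  induction l generalizing b with
  | nil => simp
  | cons x t ih =>
    simp only [List.foldl_cons, List.all_cons, ih]
    cases p x <;> simp

-- `"c" in s` for a single character is list membership
theorem isIn_single (c : Char) (s : String) :
    PySem.Str.isIn (String.ofList [c]) s = s.toList.contains c := by
  rw [Bool.eq_iff_iff]
  simp only [PySem.Str.isIn_eq, String.toList_ofList, PySem.Chars.isIn_iff_infix,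
    List.contains_iff_mem]
  constructor
  · intro h; exact h.sublist.mem (by simp)
  · intro h
    obtain ⟨l1, l2, hsl⟩ := List.append_of_mem h
    exact ⟨l1, l2, by rw [hsl]; simp⟩

-- the fold of intersections is a filter of the starting set
theorem foldl_inter_filter (rs : List String) (s : List Char) :
    rs.foldl (fun c r => PySem.Set.inter c (PySem.Set.ofList r.toList)) s
      = s.filter (fun c => rs.all (fun r => r.toList.contains c)) := by
  induction rs generalizing s with
  | nil => simp
  | cons r t ih =>
    rw [List.foldl_cons, ih]
    simp only [PySem.Set.inter, List.filter_filter]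
    apply List.filter_congr
    intro c _
    rw [Bool.eq_iff_iff]
    simp [PySem.Set.mem_ofList, and_comm]

-- min of an ascending list is its head
theorem min?_of_sorted {α : Type} [LinearOrder α] (l : List α) (h : l.Pairwise (· ≤ ·)) :
    PySem.List.min? l (fun x => x) = l.head? := by
  cases l with
  | nil => simp [PySem.List.min?]
  | cons x t =>
    rw [PySem.List.min?_id_cons]
    have h1 : ∀ y ∈ t, x ≤ y := (List.pairwise_cons.mp h).1
    have h2 := PySem.List.foldl_min_le t x
    rcases PySem.List.foldl_min_mem t x with he | hm
    · simp [he]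
    · simp [le_antisymm h2.1 (h1 _ hm)]

theorem head?_filter {α : Type} (p : α → Bool) (l : List α) :
    (l.filter p).head? = l.find? p := by
  induction l with
  | nil => rfl
  | cons x t ih => by_cases h : p x <;> simp [h, ih]

theorem filter_sorted_digits (p : Char → Bool) :
    (("0123456789".toList).filter p).Pairwise (· ≤ ·) := by
  apply List.Pairwise.filter
  decide

-- A's outer loop is `find?` over the corresponding digit characters
theorem loop_find (results : List String) :
    ∀ (l : List Int) (cs : List Char),
      l.map PySem.Int.toStr = cs.map (fun c => String.ofList [c]) →
      getCommonDigitLoop results l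
        = (cs.find? (fun c => results.all (fun r => r.toList.contains c))).map
            (fun c => String.ofList [c]) := by
  intro l
  induction l with
  | nil =>
    intro cs h
    cases cs with
    | nil => rfl
    | cons c cs' => simp at h
  | cons i t ih =>
    intro cs h
    cases cs with
    | nil => simp at h
    | cons c cs' =>
      simp only [List.map_cons, List.cons.injEq] at h
      obtain ⟨h1, h2⟩ := h
      simp only [getCommonDigitLoop, foldl_if_all, Bool.true_and, h1, isIn_single]
      rw [List.find?_cons]
      cases hq : (results.all fun r => r.toList.contains c) <;> simp [ih _ h2]

-- ===== VERDICT (by name: the statement is the Claim_ definition above) =====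
theorem get_common_digit_spec : Claim_equal_get_common_digit := by
  intro results _
  show get_common_digit results = get_common_digit_alt results
  have hb : get_common_digit_alt results
      = ("0123456789".toList.find? (fun c => results.all (fun r => r.toList.contains c))).map
          (fun c => String.ofList [c]) := by
    have h10 : PySem.Set.ofList "0123456789".toList = "0123456789".toList := by decide
    simp only [get_common_digit_alt, h10, foldl_inter_filter,
      min?_of_sorted _ (filter_sorted_digits _), head?_filter]
    cases hf : ("0123456789".toList.find? fun c => results.all fun r => r.toList.contains c) with
    | none => simp
    | some x =>
      have hne : ("0123456789".toList.filter
          (fun c => results.all (fun r => r.toList.contains c))) ≠ [] := by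
        intro hn
        have hh := head?_filter (fun c => results.all (fun r => r.toList.contains c))
          "0123456789".toList
        rw [hn, hf] at hh
        simp at hh
      rw [if_pos hne]
      rfl
  rw [hb]
  unfold get_common_digit
  exact loop_find results _ _ (by decide)
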